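-- pv_equiv track=rewrite | github.com/gpx0214/train-schedule-to-svg | view_train_list.py | get_nearest_one
-- ===== SOURCE A (Python) =====
-- def get_nearest_one(n, size, target):
--     ret = -1
--     for i in range(size):
--         if n & (1 << i):
--             ret = i
--             if i >= target:
--                 return ret
--     return ret
-- ===== SOURCE B (Python) =====
-- def get_nearest_one(n, size, target):
--     # Word-wise bit arithmetic instead of a per-bit scan.
--     if size <= 0:
--         return -1
--     t = min(max(target, 0), size)
--     m = n % (1 << size)          # the low `size` bits of n, as a nonnegative int
--     high = (m >> t) << t         # the bits of m at positions >= t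
--     if high:
--         return (high & -high).bit_length() - 1   # lowest set bit at or above t
--     if m:
--         return m.bit_length() - 1                # highest set bit (all are below t)
--     return -1
-- ===== Notes on version B (the rewrite author's own statement) =====
-- stated objective: faster
-- what changed: Replaces the per-bit loop over range(size) with O(1)-word bit arithmetic: mask n to its low size bits, split at the clamped target, and read the nearest index off bit_length / the lowest-set-bit trick instead of scanning bits one by one.
import Mathlib
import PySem

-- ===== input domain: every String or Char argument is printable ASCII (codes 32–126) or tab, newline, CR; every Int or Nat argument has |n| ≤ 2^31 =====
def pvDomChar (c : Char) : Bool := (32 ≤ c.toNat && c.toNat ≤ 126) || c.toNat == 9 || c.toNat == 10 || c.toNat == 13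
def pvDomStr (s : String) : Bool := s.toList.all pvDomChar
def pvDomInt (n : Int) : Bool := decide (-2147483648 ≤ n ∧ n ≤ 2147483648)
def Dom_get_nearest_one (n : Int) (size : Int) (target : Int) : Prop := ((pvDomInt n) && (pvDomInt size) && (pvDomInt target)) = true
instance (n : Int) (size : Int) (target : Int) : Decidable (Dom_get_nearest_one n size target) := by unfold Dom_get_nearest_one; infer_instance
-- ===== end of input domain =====

-- B replaces A's per-bit scan over range(size) by word-wise bit arithmetic (mask, shifts, bit_length).

-- ===== PORT A =====
-- loop `for i in range(size): if n & (1 << i): ret = i; if i >= target: return ret`,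
-- as structural recursion on the remaining iteration count k, with i the current index and ret the accumulator
def goA (n target : Int) : Nat → Nat → Int → Int
  | 0, _, ret => ret
  | k+1, i, ret =>
    if PySem.Int.band n ((1:Int) <<< i) ≠ 0 then
      if target ≤ (i : Int) then (i : Int) else goA n target k (i+1) (i : Int)
    else goA n target k (i+1) ret

def get_nearest_one (n : Int) (size : Int) (target : Int) : Int :=
  goA n target size.toNat 0 (-1)

-- ===== PORT B =====
-- port of Source B; the shift amounts `size` and `t` are taken via .toNat, exact because size > 0 and 0 ≤ t on those paths
def get_nearest_one_alt (n : Int) (size : Int) (target : Int) : Int :=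
  if size ≤ 0 then -1
  else
    let t : Int := min (max target 0) size
    let m : Int := PySem.Int.mod n ((1:Int) <<< size.toNat)
    let high : Int := (m >>> t.toNat) <<< t.toNat
    if high ≠ 0 then (PySem.Int.bitLength (PySem.Int.band high (-high)) : Int) - 1
    else if m ≠ 0 then (PySem.Int.bitLength m : Int) - 1
    else -1

-- ===== PRECONDITION & SPEC =====
def Spec_get_nearest_one (n : Int) (size : Int) (target : Int) (out : Int) : Prop := out = get_nearest_one_alt n size target
instance (n : Int) (size : Int) (target : Int) (out : Int) : Decidable (Spec_get_nearest_one n size target out) := by unfold Spec_get_nearest_one; infer_instance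

-- ===== CLAIM (what is proved, stated in full; the proofs are below) =====
def Claim_equal_get_nearest_one : Prop := ∀ (n : Int) (size : Int) (target : Int), Dom_get_nearest_one n size target → Spec_get_nearest_one n size target (get_nearest_one n size target)

-- ===== LEMMAS AND PROOFS =====

lemma pv_shl_one (c : Nat) : (1:Int) <<< c = ((2^c : Nat) : Int) := by
  rw [Int.shiftLeft_eq]
  push_cast
  ring

lemma pv_bl_ub (x : Nat) : x < 2 ^ PySem.Int.bitLength (x:Int) := by
  have h := PySem.Int.lt_two_pow_bitLength (x:Int)
  simpa using h

lemma pv_bl_lb (x : Nat) (hx : x ≠ 0) : 2 ^ (PySem.Int.bitLength (x:Int) - 1) ≤ x := by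
  have h := PySem.Int.two_pow_bitLength_le (x:Int) (by exact_mod_cast hx)
  simpa using h

lemma pv_bl_pin (x i : Nat) (h1 : 2^i ≤ x) (h2 : x < 2^(i+1)) :
    PySem.Int.bitLength (x:Int) = i + 1 := by
  have hx : x ≠ 0 := by have := Nat.two_pow_pos i; omega
  have hub := pv_bl_ub x
  have hlb := pv_bl_lb x hx
  set L := PySem.Int.bitLength (x:Int) with hL
  have hi_lt : i < L := by
    by_contra hcon
    push_neg at hcon
    have : 2^L ≤ 2^i := Nat.pow_le_pow_right (by norm_num) hcon
    omega
  have hle : L - 1 < i + 1 := by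
    by_contra hcon
    push_neg at hcon
    have : 2^(i+1) ≤ 2^(L-1) := Nat.pow_le_pow_right (by norm_num) hcon
    omega
  omega

lemma pv_testBit_iff_mod (x i : Nat) : x.testBit i = true ↔ 2^i ≤ x % 2^(i+1) := by
  rw [Nat.testBit_eq_decide_div_mod_eq]
  have hmp : x % 2^(i+1) = x % 2^i + 2^i * (x / 2^i % 2) := Nat.mod_pow_succ
  have hlt : x % 2^i < 2^i := Nat.mod_lt _ (Nat.two_pow_pos i)
  rcases Nat.mod_two_eq_zero_or_one (x / 2^i) with h | h <;>
    rw [h] at hmp <;> simp [h] <;> omega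

lemma pv_testBit_congr (x y i : Nat) (h : x % 2^(i+1) = y % 2^(i+1)) :
    x.testBit i = y.testBit i := by
  have hx : x % 2^(i+1) = x % 2^i + 2^i * (x/2^i % 2) := Nat.mod_pow_succ
  have hy : y % 2^(i+1) = y % 2^i + 2^i * (y/2^i % 2) := Nat.mod_pow_succ
  have hx2 : x % 2^i < 2^i := Nat.mod_lt _ (Nat.two_pow_pos i)
  have hy2 : y % 2^i < 2^i := Nat.mod_lt _ (Nat.two_pow_pos i)
  have hd : x/2^i % 2 = y/2^i % 2 := by
    rcases Nat.mod_two_eq_zero_or_one (x/2^i) with h1 | h1 <;>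
      rcases Nat.mod_two_eq_zero_or_one (y/2^i) with h2 | h2 <;>
        rw [h1] at hx <;> rw [h2] at hy <;> omega
  rw [Nat.testBit_eq_decide_div_mod_eq, Nat.testBit_eq_decide_div_mod_eq, hd]

lemma pv_negmod (k c : Nat) :
    (-((k:Int)+1)) % ((2^c : Nat) : Int) = ((2^c - 1 - k % 2^c : Nat) : Int) := by
  set P := 2^c with hP
  have hP0 : 0 < P := Nat.two_pow_pos c
  set r := k % P with hr
  have hrP : r < P := Nat.mod_lt _ hP0
  have hrk : r ≤ k := Nat.mod_le k P
  have hdvd : (P:Int) ∣ ((k:Int) - (r:Int)) := by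
    have h1 : P ∣ (k - r) := by rw [hr]; exact Nat.dvd_sub_mod k
    have h2 := Int.natCast_dvd_natCast.mpr h1
    have h3 : ((k - r : Nat) : Int) = (k:Int) - (r:Int) := by omega
    rwa [h3] at h2
  have key : (-((k:Int)+1)) % (P:Int) = ((P - 1 - r : Nat) : Int) % (P:Int) := by
    rw [Int.emod_eq_emod_iff_emod_sub_eq_zero]
    have heq : (-((k:Int)+1)) - ((P - 1 - r : Nat) : Int) = -(((k:Int) - (r:Int)) + (P:Int)) := by
      omega
    rw [heq]
    rcases hdvd with ⟨q, hq⟩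
    have hform : -(((k:Int) - (r:Int)) + (P:Int)) = (P:Int) * (-q - 1) := by rw [hq]; ring
    rw [hform]
    exact Int.mul_emod_right _ _
  rw [key, Int.emod_eq_of_lt (by omega) (by omega)]

lemma pv_and_two_pow_eq_zero (x i : Nat) : x &&& 2^i = 0 ↔ x.testBit i = false := by
  rw [Nat.and_two_pow]
  have := Nat.two_pow_pos i
  cases h : x.testBit i <;> simp

-- Python `n & (1 << i)` is zero iff bit i of n's low `s` bits is clear (i < s)
lemma pv_bit_bridge (n : Int) (s M : Nat) (hM : (M:Int) = n % ((2^s:Nat):Int)) (i : Nat) (hi : i < s) :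
    (PySem.Int.band n ((1:Int) <<< i) = 0) ↔ M.testBit i = false := by
  have hmod : ((M % 2^(i+1) : Nat) : Int) = n % ((2^(i+1):Nat):Int) := by
    have hdvd : ((2^(i+1):Nat):Int) ∣ ((2^s:Nat):Int) :=
      Int.natCast_dvd_natCast.mpr (pow_dvd_pow 2 (by omega))
    calc ((M % 2^(i+1) : Nat) : Int) = (M:Int) % ((2^(i+1):Nat):Int) := Int.natCast_mod _ _
      _ = (n % ((2^s:Nat):Int)) % ((2^(i+1):Nat):Int) := by rw [hM]
      _ = n % ((2^(i+1):Nat):Int) := Int.emod_emod_of_dvd n hdvd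
  rw [pv_shl_one]
  by_cases hn : 0 ≤ n
  · rw [PySem.Int.band_of_nonneg hn (by positivity), Int.toNat_natCast]
    have hcast : ((n.toNat &&& 2^i : Nat) : Int) = 0 ↔ n.toNat &&& 2^i = 0 := by
      exact_mod_cast Int.natCast_eq_zero
    rw [hcast, pv_and_two_pow_eq_zero]
    have hnn : n = ((n.toNat : Nat) : Int) := (Int.toNat_of_nonneg hn).symm
    have h4 : n % ((2^(i+1):Nat):Int) = ((n.toNat % 2^(i+1) : Nat):Int) := by
      conv_lhs => rw [hnn]
      rw [← Int.natCast_mod]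
    have hmmN : M % 2^(i+1) = n.toNat % 2^(i+1) := by exact_mod_cast hmod.trans h4
    rw [pv_testBit_congr n.toNat M i hmmN.symm]
  · push_neg at hn
    set k : Nat := (-n-1).toNat with hk
    have hnk : n = -((k:Int)+1) := by omega
    have hband : PySem.Int.band n (((2^i:Nat):Int)) = ((2^i - (2^i &&& k) : Nat) : Int) := by
      simp only [PySem.Int.band]
      rw [if_neg (by omega), if_pos (by positivity)]
      rw [Int.toNat_natCast]
    rw [hband]
    have h1 : ((2^i - (2^i &&& k) : Nat) : Int) = 0 ↔ 2^i &&& k = 2^i := by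
      have hle : 2^i &&& k ≤ 2^i := Nat.and_le_left
      constructor
      · intro h
        have h' : (2^i - (2^i &&& k) : Nat) = 0 := by exact_mod_cast h
        omega
      · intro h; rw [h]; simp
    have h2 : 2^i &&& k = 2^i ↔ k.testBit i = true := by
      rw [Nat.land_comm, Nat.and_two_pow]
      have := Nat.two_pow_pos i
      cases h : k.testBit i <;> simp <;> omega
    have hneg : n % ((2^(i+1):Nat):Int) = ((2^(i+1) - 1 - k % 2^(i+1) : Nat) : Int) := by
      rw [hnk]; exact pv_negmod k (i+1)
    have hMv : M % 2^(i+1) = 2^(i+1) - 1 - k % 2^(i+1) := by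
      have := hmod.trans hneg
      exact_mod_cast this
    have hkub : k % 2^(i+1) < 2^(i+1) := Nat.mod_lt _ (Nat.two_pow_pos _)
    have hMub : M % 2^(i+1) < 2^(i+1) := Nat.mod_lt _ (Nat.two_pow_pos _)
    have hkbit : k.testBit i = true ↔ 2^i ≤ k % 2^(i+1) := pv_testBit_iff_mod k i
    have hMbit : M.testBit i = true ↔ 2^i ≤ M % 2^(i+1) := pv_testBit_iff_mod M i
    rw [h1, h2]
    have hpow : (2:Nat)^(i+1) = 2 * 2^i := by ring
    constructor
    · intro hk
      cases hA : M.testBit i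
      · rfl
      · exfalso
        have hA' := hMbit.mp hA
        have hk' := hkbit.mp hk
        omega
    · intro hm
      cases hB : k.testBit i
      · exfalso
        have h5 : ¬ 2^i ≤ k % 2^(i+1) := fun hc => by
          rw [hkbit.mpr hc] at hB; exact absurd hB (by decide)
        have h7 : ¬ 2^i ≤ M % 2^(i+1) := fun hc => by
          rw [hMbit.mpr hc] at hm; exact absurd hm (by decide)
        omega
      · rfl

lemma pv_top_bit (x : Nat) (hx : x ≠ 0) :
    x.testBit (PySem.Int.bitLength (x:Int) - 1) = true := by
  have hub := pv_bl_ub x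
  have hlb := pv_bl_lb x hx
  set L := PySem.Int.bitLength (x:Int) with hL
  have hL0 : 0 < L := by
    rcases Nat.eq_zero_or_pos L with h | h
    · rw [h] at hub; simp at hub; omega
    · exact h
  rw [Nat.testBit_eq_decide_div_mod_eq]
  have hdiv : x / 2^(L-1) = 1 := by
    apply Nat.div_eq_of_lt_le (by omega)
    have h2 : 2^L = 2 * 2^(L-1) := by
      rw [← pow_succ']
      congr 1
      omega
    omega
  rw [hdiv]
  decide

lemma pv_high_bits (M t u : Nat) :
    ((M >>> t) <<< t).testBit u = (decide (t ≤ u) && M.testBit u) := by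
  rw [Nat.shiftRight_eq_div_pow, Nat.shiftLeft_eq]
  rcases Nat.lt_or_ge u t with h | h
  · have hsplit : (2:Nat)^t = 2^u * 2^(t-u) := by
      rw [← pow_add]; congr 1; omega
    have h2 : (M / 2^t * 2^t) / 2^u = M / 2^t * 2^(t-u) := by
      have hre : M / 2^t * 2^t = (M / 2^t * 2^(t-u)) * 2^u := by
        rw [hsplit]; ring
      rw [hre, Nat.mul_div_cancel _ (Nat.two_pow_pos u)]
    have h3 : M / 2^t * 2^(t-u) % 2 = 0 := by
      have he : t - u = (t-u-1)+1 := by omega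
      rw [he, pow_succ, ← mul_assoc, Nat.mul_mod_left]
    rw [Nat.testBit_eq_decide_div_mod_eq, h2]
    simp [h3, Nat.not_le.mpr h]
  · have hsplit : (2:Nat)^u = 2^t * 2^(u-t) := by
      rw [← pow_add]; congr 1; omega
    have h2 : (M / 2^t * 2^t) / 2^u = M / 2^u := by
      rw [hsplit, ← Nat.div_div_eq_div_mul, Nat.mul_div_cancel _ (Nat.two_pow_pos t),
          Nat.div_div_eq_div_mul, ← pow_add, Nat.add_sub_cancel' h]
    rw [Nat.testBit_eq_decide_div_mod_eq, Nat.testBit_eq_decide_div_mod_eq, h2]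
    simp [h]

-- the lowest-set-bit trick: x - (x &&& (x-1)) isolates the lowest set bit
lemma pv_lsb : ∀ H : Nat, H ≠ 0 →
    ∃ j, H - (H &&& (H-1)) = 2^j ∧ H.testBit j = true ∧ ∀ u, u < j → H.testBit u = false := by
  intro H
  induction H using Nat.strong_induction_on with
  | _ H ih =>
    intro hH
    rcases Nat.even_or_odd H with ⟨b, hb⟩ | ⟨b, hb⟩
    · -- even: H = 2*b with b ≠ 0
      have hb2 : H = 2*b := by omega
      have hb0 : b ≠ 0 := by omega
      have e1 : 2*b/2 = b := by omega
      have hland : (2*b) &&& (2*b - 1) = 2 * (b &&& (b-1)) := by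
        apply Nat.eq_of_testBit_eq
        intro u
        cases u with
        | zero =>
          rw [Nat.testBit_land, Nat.testBit_zero, Nat.testBit_zero, Nat.testBit_zero]
          have g1 : 2*b % 2 = 0 := by omega
          have g2 : 2*(b &&& (b-1)) % 2 = 0 := by omega
          simp [g1, g2]
        | succ u =>
          rw [Nat.testBit_land, Nat.testBit_succ, Nat.testBit_succ, Nat.testBit_succ]
          have e2 : (2*b-1)/2 = b-1 := by omega
          have e3 : 2*(b &&& (b-1))/2 = b &&& (b-1) := by omega
          rw [e1, e2, e3]
          exact (Nat.testBit_land b (b-1) u).symm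
      obtain ⟨j, hj1, hj2, hj3⟩ := ih b (by omega) hb0
      have hle : b &&& (b-1) ≤ b := Nat.and_le_left
      refine ⟨j+1, ?_, ?_, ?_⟩
      · rw [hb2, hland]
        have hp : 2^(j+1) = 2*2^j := by ring
        omega
      · rw [hb2, Nat.testBit_succ, e1]
        exact hj2
      · intro u hu
        cases u with
        | zero =>
          rw [hb2, Nat.testBit_zero]
          have g1 : 2*b % 2 = 0 := by omega
          simp [g1]
        | succ u =>
          rw [hb2, Nat.testBit_succ, e1]
          exact hj3 u (by omega)
    · -- odd: H = 2*b+1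
      have e1 : 2*b/2 = b := by omega
      have e2 : (2*b+1)/2 = b := by omega
      have hland : (2*b+1) &&& (2*b) = 2*b := by
        apply Nat.eq_of_testBit_eq
        intro u
        cases u with
        | zero =>
          rw [Nat.testBit_land, Nat.testBit_zero, Nat.testBit_zero]
          have g1 : (2*b+1) % 2 = 1 := by omega
          have g2 : 2*b % 2 = 0 := by omega
          simp [g1, g2]
        | succ u =>
          rw [Nat.testBit_land, Nat.testBit_succ, Nat.testBit_succ, e1, e2, Bool.and_self]
      refine ⟨0, ?_, ?_, ?_⟩
      · have hm1 : 2*b+1-1 = 2*b := by omega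
        rw [hb, hm1, hland]
        have h0 : (2:Nat)^0 = 1 := by norm_num
        omega
      · rw [hb, Nat.testBit_zero]
        have g1 : (2*b+1) % 2 = 1 := by omega
        simp [g1]
      · intro u hu; omega

-- A's loop when some set bit at or above target exists within size: it returns the least one
lemma pv_goA_found (n target : Int) (s M : Nat)
    (hbit : ∀ i, i < s → ((PySem.Int.band n ((1:Int) <<< i) = 0) ↔ M.testBit i = false))
    (hex : ∃ j, M.testBit j = true ∧ j < s ∧ target ≤ (j:Int)) :
    ∀ k i ret, i + k = s →
      (∀ j, j < i → ¬(M.testBit j = true ∧ j < s ∧ target ≤ (j:Int))) →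
      goA n target k i ret = ((Nat.find hex : Nat) : Int) := by
  intro k
  induction k with
  | zero =>
    intro i ret hik hgood
    exfalso
    obtain ⟨j, hj1, hj2, hj3⟩ := hex
    exact hgood j (by omega) ⟨hj1, hj2, hj3⟩
  | succ k ih =>
    intro i ret hik hgood
    have his : i < s := by omega
    show (if PySem.Int.band n ((1:Int) <<< i) ≠ 0 then
            if target ≤ (i : Int) then (i : Int) else goA n target k (i+1) (i : Int)
          else goA n target k (i+1) ret) = _
    by_cases hb : PySem.Int.band n ((1:Int) <<< i) = 0
    · rw [if_neg (by simpa using hb)]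
      have hbf : M.testBit i = false := (hbit i his).mp hb
      apply ih (i+1) ret (by omega)
      intro j hj hgj
      rcases Nat.lt_succ_iff_lt_or_eq.mp hj with h | h
      · exact hgood j h hgj
      · subst h; rw [hbf] at hgj; exact Bool.false_ne_true hgj.1
    · rw [if_pos (by simpa using hb)]
      have hbt : M.testBit i = true := by
        cases h : M.testBit i
        · exact absurd ((hbit i his).mpr h) hb
        · rfl
      by_cases ht : target ≤ (i:Int)
      · rw [if_pos ht]
        have hfind : Nat.find hex = i := by
          rw [Nat.find_eq_iff]
          exact ⟨⟨hbt, his, ht⟩, fun j hj => hgood j hj⟩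
        rw [hfind]
      · rw [if_neg ht]
        apply ih (i+1) (i:Int) (by omega)
        intro j hj hgj
        rcases Nat.lt_succ_iff_lt_or_eq.mp hj with h | h
        · exact hgood j h hgj
        · subst h; exact ht hgj.2.2

-- A's loop when no set bit at or above target exists within size: it falls through to the
-- highest set bit of the low part (carried in ret)
lemma pv_goA_none (n target : Int) (s M : Nat) (hM : M < 2^s)
    (hbit : ∀ i, i < s → ((PySem.Int.band n ((1:Int) <<< i) = 0) ↔ M.testBit i = false))
    (hex : ¬ ∃ j, M.testBit j = true ∧ j < s ∧ target ≤ (j:Int)) :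
    ∀ k i ret, i + k = s →
      ret = (if M % 2^i = 0 then (-1:Int) else ((PySem.Int.bitLength ((M % 2^i : Nat) : Int) : Int) - 1)) →
      goA n target k i ret =
        if M = 0 then -1 else ((PySem.Int.bitLength ((M : Nat) : Int) : Int) - 1) := by
  intro k
  induction k with
  | zero =>
    intro i ret hik hret
    have his : i = s := by omega
    show ret = _
    rw [hret, his, Nat.mod_eq_of_lt hM]
  | succ k ih =>
    intro i ret hik hret
    have his : i < s := by omega
    show (if PySem.Int.band n ((1:Int) <<< i) ≠ 0 then
            if target ≤ (i : Int) then (i : Int) else goA n target k (i+1) (i : Int)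
          else goA n target k (i+1) ret) = _
    by_cases hb : PySem.Int.band n ((1:Int) <<< i) = 0
    · rw [if_neg (by simpa using hb)]
      have hbf : M.testBit i = false := (hbit i his).mp hb
      apply ih (i+1) ret (by omega)
      have hmp : M % 2^(i+1) = M % 2^i + 2^i * (M / 2^i % 2) := Nat.mod_pow_succ
      have hd0 : M / 2^i % 2 = 0 := by
        have ht := Nat.testBit_eq_decide_div_mod_eq (x := M) (i := i)
        rw [hbf] at ht
        have hne : ¬ (M / 2^i % 2 = 1) := by
          intro hc; rw [hc] at ht; simp at ht
        omega
      rw [hd0] at hmp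
      rw [show M % 2^(i+1) = M % 2^i from by omega]
      exact hret
    · rw [if_pos (by simpa using hb)]
      have hbt : M.testBit i = true := by
        cases h : M.testBit i
        · exact absurd ((hbit i his).mpr h) hb
        · rfl
      by_cases ht : target ≤ (i:Int)
      · exact absurd ⟨i, hbt, his, ht⟩ hex
      · rw [if_neg ht]
        apply ih (i+1) (i:Int) (by omega)
        have hmp : M % 2^(i+1) = M % 2^i + 2^i * (M / 2^i % 2) := Nat.mod_pow_succ
        have hd1 : M / 2^i % 2 = 1 := by
          have htb := Nat.testBit_eq_decide_div_mod_eq (x := M) (i := i)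
          rw [hbt] at htb
          exact of_decide_eq_true htb.symm
        rw [hd1] at hmp
        have hlt : M % 2^i < 2^i := Nat.mod_lt _ (Nat.two_pow_pos i)
        have hge : 2^i ≤ M % 2^(i+1) := by omega
        have hub2 : M % 2^(i+1) < 2^(i+1) := Nat.mod_lt _ (Nat.two_pow_pos _)
        rw [if_neg (by have := Nat.two_pow_pos i; omega : ¬ M % 2^(i+1) = 0)]
        rw [pv_bl_pin (M % 2^(i+1)) i hge hub2]
        push_cast
        ring

-- ===== VERDICT (by name: the statement is the Claim_ definition above) =====
theorem get_nearest_one_spec : Claim_equal_get_nearest_one := by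
  intro n size target _
  show get_nearest_one n size target = get_nearest_one_alt n size target
  unfold get_nearest_one get_nearest_one_alt
  by_cases hsz : size ≤ 0
  · rw [if_pos hsz, Int.toNat_of_nonpos hsz]
    rfl
  · rw [if_neg hsz]
    push_neg at hsz
    dsimp only
    set s := size.toNat with hs
    have hs0 : 0 < s := by omega
    rw [pv_shl_one]
    have hpos : (0:Int) < ((2^s : Nat):Int) := by exact_mod_cast Nat.two_pow_pos s
    rw [PySem.Int.mod_eq_emod_of_pos hpos]
    set mI : Int := n % ((2^s:Nat):Int) with hmI
    have hm0 : 0 ≤ mI := Int.emod_nonneg n (by omega)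
    have hmlt : mI < ((2^s:Nat):Int) := Int.emod_lt_of_pos n hpos
    set M : Nat := mI.toNat with hMdef
    have hMI : (M:Int) = mI := Int.toNat_of_nonneg hm0
    have hM : M < 2^s := by omega
    have hbit := fun i hi => pv_bit_bridge n s M (by rw [hMI]) i hi
    set t : Int := min (max target 0) size with htdef
    have ht0 : 0 ≤ t := by omega
    set t' : Nat := t.toNat with ht'
    have htarget : ∀ j : Nat, j < s → (target ≤ (j:Int) ↔ t' ≤ j) := by
      intro j hj
      omega
    rw [← hMI, ← Int.natCast_shiftRight, ← Int.natCast_shiftLeft]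
    set H : Nat := (M >>> t') <<< t' with hHdef
    have hHbits : ∀ u, H.testBit u = (decide (t' ≤ u) && M.testBit u) := fun u => pv_high_bits M t' u
    have hHM : H ≤ M := by
      rw [hHdef, Nat.shiftRight_eq_div_pow, Nat.shiftLeft_eq]
      exact Nat.div_mul_le_self _ _
    by_cases hex : ∃ j, M.testBit j = true ∧ j < s ∧ target ≤ (j:Int)
    · rw [pv_goA_found n target s M hbit hex s 0 (-1) (by omega)
        (fun j hj => absurd hj (Nat.not_lt_zero j))]
      have hjP := Nat.find_spec hex
      have hHj : H.testBit (Nat.find hex) = true := by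
        rw [hHbits]
        simp [hjP.1, (htarget _ hjP.2.1).mp hjP.2.2]
      have hHne : H ≠ 0 := by
        intro h0; rw [h0, Nat.zero_testBit] at hHj; exact Bool.false_ne_true hHj
      have hHneI : ((H:Nat):Int) ≠ 0 := by exact_mod_cast hHne
      rw [if_pos hHneI]
      have hHpos : 0 < H := Nat.pos_of_ne_zero hHne
      have hband : PySem.Int.band (H:Int) (-(H:Int)) = ((H - (H &&& (H-1)) : Nat) : Int) := by
        simp only [PySem.Int.band]
        rw [if_pos (by exact_mod_cast Nat.zero_le H), if_neg (by omega)]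
        have e1 : ((H:Int)).toNat = H := Int.toNat_natCast H
        have e2 : (-(-(H:Int)) - 1).toNat = H - 1 := by omega
        rw [e1, e2]
      rw [hband]
      obtain ⟨jl, hl1, hl2, hl3⟩ := pv_lsb H hHne
      rw [hl1]
      rw [pv_bl_pin (2^jl) jl (le_refl _) ((Nat.pow_lt_pow_iff_right (by norm_num)).mpr (Nat.lt_succ_self jl))]
      have h1 : t' ≤ jl ∧ M.testBit jl = true := by
        have h := hl2
        rw [hHbits] at h
        simpa using h
      have hjls : jl < s := by
        have hgj : 2^jl ≤ H := Nat.ge_two_pow_of_testBit hl2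
        have hcmp : (2:Nat)^jl < 2^s := by omega
        exact (Nat.pow_lt_pow_iff_right (by norm_num)).mp hcmp
      have hgood_jl : M.testBit jl = true ∧ jl < s ∧ target ≤ (jl:Int) :=
        ⟨h1.2, hjls, (htarget jl hjls).mpr h1.1⟩
      have h2 : Nat.find hex ≤ jl := Nat.find_min' hex hgood_jl
      have h3 : jl ≤ Nat.find hex := by
        by_contra hcon
        push_neg at hcon
        rw [hl3 (Nat.find hex) hcon] at hHj
        exact Bool.false_ne_true hHj
      have hfj : jl = Nat.find hex := by omega
      rw [← hfj]
      push_cast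
      ring
    · rw [pv_goA_none n target s M hM hbit hex s 0 (-1) (by omega) (by simp)]
      have hH0 : H = 0 := by
        by_contra h0
        have htop := pv_top_bit H h0
        set ub := PySem.Int.bitLength ((H:Nat):Int) - 1 with hub
        have h1 : (decide (t' ≤ ub) && M.testBit ub) = true := by rw [← hHbits]; exact htop
        have h1' : t' ≤ ub ∧ M.testBit ub = true := by simpa using h1
        have hus : ub < s := by
          have hgj : 2^ub ≤ H := Nat.ge_two_pow_of_testBit htop
          have hcmp : (2:Nat)^ub < 2^s := by omega
          exact (Nat.pow_lt_pow_iff_right (by norm_num)).mp hcmp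
        exact hex ⟨ub, h1'.2, hus, (htarget ub hus).mpr h1'.1⟩
      rw [hH0]
      rw [if_neg (show ¬ ((((0:Nat) : Int)) ≠ 0) by simp)]
      by_cases hM0 : M = 0
      · rw [if_pos hM0, if_neg (by simp [hM0])]
      · rw [if_neg hM0, if_pos (by exact_mod_cast hM0)]
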